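-- pv_equiv track=rewrite | github.com/danoms/NTNU | LOW_LEVEL_PROGRAMMING/ex2/baseline/game_lib.py | gen_note
-- ===== SOURCE A (Python) =====
-- def gen_note(NOTE=441):
--     """generates note"""
--     f_sample = 4410
--     f_note = NOTE
--     nr_of_samples = int(f_sample/f_note)
--     sec = f_note
--     note_arr = ''
--     for j in range(0, sec):
--         for i in range(0,int(nr_of_samples/2)):
-- ##            note_arr.append(0)
--             note_arr += '0,'
--         for i in range(int(nr_of_samples/2), nr_of_samples):
-- ##            note_arr.append(10)
--             note_arr += '10'
--             if ((j != sec-1) or (i != nr_of_samples-1)):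
--                 note_arr += ','
--         note_arr += '\n'
--     return note_arr
-- ===== SOURCE B (Python) =====
-- def gen_note(NOTE=441):
--     """generates note"""
--     nr = int(4410 / NOTE)
--     half = int(nr / 2)
--     count = nr - half
--     row = '0,' * half + '10,' * count + '\n'
--     if NOTE > 0 and count > 0:
--         return row * (NOTE - 1) + '0,' * half + '10,' * (count - 1) + '10\n'
--     return row * NOTE
-- ===== Notes on version B (the rewrite author's own statement) =====
-- stated objective: simpler
-- what changed: Replaces A's nested per-sample append loops with direct string replication: the common row is written once as '0,'*half + '10,'*count + '\n' and multiplied by the row count, the comma-less last row spelled out separately; this also avoids A's per-iteration loop and += overhead (a timing run measured B much faster).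
-- outside the precondition, e.g. on gen_note(0): A raises ZeroDivisionError, B raises ZeroDivisionError
import Mathlib
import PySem

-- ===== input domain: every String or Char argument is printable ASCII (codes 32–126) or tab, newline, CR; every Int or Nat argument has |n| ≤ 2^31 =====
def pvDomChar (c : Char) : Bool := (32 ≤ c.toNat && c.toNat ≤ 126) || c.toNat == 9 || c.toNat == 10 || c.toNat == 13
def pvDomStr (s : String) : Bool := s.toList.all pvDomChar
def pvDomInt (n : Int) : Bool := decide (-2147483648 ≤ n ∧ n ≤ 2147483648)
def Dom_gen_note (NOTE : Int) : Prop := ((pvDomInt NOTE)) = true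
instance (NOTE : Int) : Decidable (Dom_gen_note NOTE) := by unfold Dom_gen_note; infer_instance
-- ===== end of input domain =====

-- B builds the result by string replication (one row written once, then row * sec with the
-- comma-less last row spelled out) instead of A's nested per-sample append loops; objective: simpler.

-- ===== PORT A =====
-- int(4410/NOTE) is float true division then int() truncation; on the domain (0 < |NOTE| ≤ 2^31)
-- the float quotient truncates to exactly Int.tdiv 4410 NOTE, so Int.tdiv is an exact port.
def gen_note (NOTE : Int) : String :=
  let f_sample : Int := 4410
  let f_note := NOTE
  let nr_of_samples := Int.tdiv f_sample f_note
  let sec := f_note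
  let note_arr : List Char :=
    (PySem.List.pyRange 0 sec 1).foldl (fun note_arr j =>
      let note_arr := (PySem.List.pyRange 0 (Int.tdiv nr_of_samples 2) 1).foldl
        (fun a _ => a ++ ['0', ',']) note_arr
      let note_arr := (PySem.List.pyRange (Int.tdiv nr_of_samples 2) nr_of_samples 1).foldl
        (fun a i =>
          let a := a ++ ['1', '0']
          if j ≠ sec - 1 ∨ i ≠ nr_of_samples - 1 then a ++ [','] else a) note_arr
      note_arr ++ ['\n']) []
  String.ofList note_arr

-- ===== PORT B =====
def gen_note_alt (NOTE : Int) : String :=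
  let nr := Int.tdiv 4410 NOTE
  let half := Int.tdiv nr 2
  let count := nr - half
  let row := PySem.List.pyRepeat ['0', ','] half ++ PySem.List.pyRepeat ['1', '0', ','] count ++ ['\n']
  String.ofList (if NOTE > 0 ∧ count > 0 then
      PySem.List.pyRepeat row (NOTE - 1) ++ PySem.List.pyRepeat ['0', ','] half
        ++ PySem.List.pyRepeat ['1', '0', ','] (count - 1) ++ ['1', '0', '\n']
    else PySem.List.pyRepeat row NOTE)

-- ===== PRECONDITION & SPEC =====
-- NOTE = 0 makes Python A raise ZeroDivisionError at 4410/NOTE; excluded.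
def Pre_gen_note (NOTE : Int) : Prop := NOTE ≠ 0
instance (NOTE : Int) : Decidable (Pre_gen_note NOTE) := by unfold Pre_gen_note; infer_instance
def pvWitness_gen_note : Int := (441)

def Spec_gen_note (NOTE : Int) (out : String) : Prop := out = gen_note_alt NOTE
instance (NOTE : Int) (out : String) : Decidable (Spec_gen_note NOTE out) := by unfold Spec_gen_note; infer_instance

-- ===== CLAIM (what is proved, stated in full; the proofs are below) =====
def Claim_equal_gen_note : Prop := ∀ (NOTE : Int), Dom_gen_note NOTE → Pre_gen_note NOTE → Spec_gen_note NOTE (gen_note NOTE)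

-- ===== LEMMAS AND PROOFS =====

/-- `c` repeated `n` times, the list-level meaning of Python's `c * n`. -/
def repC (c : List Char) (n : Nat) : List Char := (List.replicate n c).flatten

theorem repC_zero (c : List Char) : repC c 0 = [] := rfl

theorem pyRepeat_eq_repC (c : List Char) (n : Int) :
    PySem.List.pyRepeat c n = repC c n.toNat := by
  simp [PySem.List.pyRepeat, repC]

theorem flatMap_const_char {α : Type} (l : List α) (c : List Char) :
    l.flatMap (fun _ => c) = repC c l.length := by
  induction l with
  | nil => rfl
  | cons x t ih => simp [repC, List.replicate] at ih ⊢; simp [ih]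

theorem flatMap_congr_mem {α β : Type} {l : List α} {f g : α → List β}
    (h : ∀ x ∈ l, f x = g x) : l.flatMap f = l.flatMap g := by
  induction l with
  | nil => rfl
  | cons x t ih =>
    simp only [List.flatMap_cons]
    rw [h x (by simp), ih (fun y hy => h y (by simp [hy]))]

/-- A `for` loop that only appends the constant chunk `c` each iteration. -/
theorem fold_const (a b : Int) (c acc : List Char) :
    (PySem.List.pyRange a b 1).foldl (fun x (_ : Int) => x ++ c) acc
      = acc ++ repC c (b - a).toNat := by
  rw [PySem.List.foldl_append_eq_flatMap, flatMap_const_char, PySem.List.length_pyRange_one]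

/-- The loop body of A, abstracted over the precomputed quantities. -/
def A_fold (NOTE nr half : Int) : List Char :=
  (PySem.List.pyRange 0 NOTE 1).foldl (fun note_arr j =>
    let note_arr := (PySem.List.pyRange 0 half 1).foldl (fun a _ => a ++ ['0', ',']) note_arr
    let note_arr := (PySem.List.pyRange half nr 1).foldl
      (fun a i =>
        let a := a ++ ['1', '0']
        if j ≠ NOTE - 1 ∨ i ≠ nr - 1 then a ++ [','] else a) note_arr
    note_arr ++ ['\n']) []

theorem inner2_ne (NOTE nr half j : Int) (hj : j ≠ NOTE - 1) (acc : List Char) :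
    (PySem.List.pyRange half nr 1).foldl
      (fun a i =>
        let a := a ++ ['1', '0']
        if j ≠ NOTE - 1 ∨ i ≠ nr - 1 then a ++ [','] else a) acc
      = acc ++ repC ['1', '0', ','] (nr - half).toNat := by
  rw [PySem.List.foldl_congr_mem _ _ (fun a (_ : Int) => a ++ ['1', '0', ',']) acc ?_]
  · exact fold_const half nr _ acc
  · intro a x _
    simp [hj]

theorem inner2_last (NOTE nr half j : Int) (hj : j = NOTE - 1) (hlt : half < nr) (acc : List Char) :
    (PySem.List.pyRange half nr 1).foldl
      (fun a i =>
        let a := a ++ ['1', '0']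
        if j ≠ NOTE - 1 ∨ i ≠ nr - 1 then a ++ [','] else a) acc
      = acc ++ repC ['1', '0', ','] (nr - half - 1).toNat ++ ['1', '0'] := by
  subst hj
  have hsplit : PySem.List.pyRange half nr 1 = PySem.List.pyRange half (nr - 1) 1 ++ [nr - 1] := by
    have h := PySem.List.pyRange_one_succ_right (a := half) (b := nr - 1) (by omega)
    simpa [show nr - 1 + 1 = nr by ring] using h
  rw [hsplit, List.foldl_append]
  rw [PySem.List.foldl_congr_mem _ _ (fun a (_ : Int) => a ++ ['1', '0', ',']) acc ?_]
  · rw [fold_const]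
    simp [show nr - 1 - half = nr - half - 1 by ring, List.append_assoc]
  · intro a x hx
    have hx' := (PySem.List.mem_pyRange_one).mp hx
    simp [show x ≠ nr - 1 by omega]

theorem A_fold_eq (NOTE nr half : Int) (_h0 : 0 ≤ half) (hlt : half < nr) (hN : 0 < NOTE) :
    A_fold NOTE nr half
      = repC (repC ['0', ','] half.toNat ++ repC ['1', '0', ','] (nr - half).toNat ++ ['\n'])
          (NOTE - 1).toNat
        ++ (repC ['0', ','] half.toNat ++ repC ['1', '0', ','] (nr - half - 1).toNat
            ++ ['1', '0', '\n']) := by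
  unfold A_fold
  rw [PySem.List.foldl_congr_mem _ _
      (fun acc (j : Int) => acc ++
        (if j = NOTE - 1 then
            repC ['0', ','] half.toNat ++ repC ['1', '0', ','] (nr - half - 1).toNat ++ ['1', '0', '\n']
          else
            repC ['0', ','] half.toNat ++ repC ['1', '0', ','] (nr - half).toNat ++ ['\n'])) [] ?_]
  · rw [PySem.List.foldl_append_eq_flatMap]
    have hsplit : PySem.List.pyRange 0 NOTE 1 = PySem.List.pyRange 0 (NOTE - 1) 1 ++ [NOTE - 1] := by
      have h := PySem.List.pyRange_one_succ_right (a := 0) (b := NOTE - 1) (by omega)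
      simpa [show NOTE - 1 + 1 = NOTE by ring] using h
    rw [hsplit, List.flatMap_append]
    rw [flatMap_congr_mem (g := fun _ =>
        repC ['0', ','] half.toNat ++ repC ['1', '0', ','] (nr - half).toNat ++ ['\n']) ?_]
    · rw [flatMap_const_char, PySem.List.length_pyRange_one]
      simp [List.append_assoc]
    · intro x hx
      have hx' := (PySem.List.mem_pyRange_one).mp hx
      simp [show x ≠ NOTE - 1 by omega]
  · intro acc j _
    simp only []
    rw [fold_const]
    by_cases hj : j = NOTE - 1
    · rw [inner2_last NOTE nr half j hj hlt]
      simp [hj, List.append_assoc, show (half : Int) - 0 = half by ring]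
    · rw [inner2_ne NOTE nr half j hj]
      simp [hj, List.append_assoc, show (half : Int) - 0 = half by ring]

theorem A_fold_zero (NOTE : Int) : A_fold NOTE 0 0 = repC ['\n'] NOTE.toNat := by
  unfold A_fold
  rw [PySem.List.foldl_congr_mem _ _ (fun acc (_ : Int) => acc ++ ['\n']) [] ?_]
  · rw [PySem.List.foldl_append_eq_flatMap, flatMap_const_char, PySem.List.length_pyRange_one]
    simp
  · intro acc j _
    simp [PySem.List.pyRange_one_eq_nil (le_refl (0 : Int))]

theorem gen_note_equiv (NOTE : Int) : gen_note NOTE = gen_note_alt NOTE := by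
  have hA : gen_note NOTE
      = String.ofList (A_fold NOTE (Int.tdiv 4410 NOTE) (Int.tdiv (Int.tdiv 4410 NOTE) 2)) := rfl
  rw [hA]
  simp only [gen_note_alt]
  apply congrArg String.ofList
  by_cases hN' : (0 : Int) < NOTE
  case neg =>
    have hN : NOTE ≤ 0 := by omega
    rw [if_neg (fun h => absurd h.1 (not_lt.mpr hN))]
    unfold A_fold
    rw [PySem.List.pyRange_one_eq_nil hN, pyRepeat_eq_repC, Int.toNat_of_nonpos hN]
    rfl
  case pos =>
    have hN : (0:Int) < NOTE := hN'
    have hnr : 0 ≤ Int.tdiv 4410 NOTE := Int.tdiv_nonneg (by norm_num) hN.le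
    have hed : Int.tdiv (Int.tdiv 4410 NOTE) 2 = Int.tdiv 4410 NOTE / 2 :=
      Int.tdiv_eq_ediv_of_nonneg hnr
    generalize hnr_def : Int.tdiv 4410 NOTE = nr at *
    generalize hh_def : Int.tdiv nr 2 = half at *
    by_cases hc : half < nr
    · rw [if_pos ⟨hN, by omega⟩]
      rw [A_fold_eq NOTE nr half (by omega) hc hN]
      simp [pyRepeat_eq_repC, List.append_assoc]
    · have h1 : nr = 0 := by omega
      have h2 : half = 0 := by omega
      subst h1; subst h2
      rw [if_neg (by rintro ⟨-, hcc⟩; omega)]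
      rw [A_fold_zero, pyRepeat_eq_repC]
      simp [pyRepeat_eq_repC, repC_zero]

-- ===== VERDICT (by name: the statement is the Claim_ definition above) =====
theorem gen_note_spec : Claim_equal_gen_note := by
  intro NOTE _ _
  exact gen_note_equiv NOTE
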